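-- pv_equiv track=rewrite | github.com/asabdulkareem/MODULE-5-IntroductiontoProblemSolving-Intermediate-2 | Python/src/day46/Exercise.py | ex1ElementsRemoval
-- ===== SOURCE A (Python) =====
-- def ex1ElementsRemoval(arr):
--     arr.sort(reverse=True)
--     total = 0
--     for i in range(len(arr)):
--         total += arr[i]
--     ans = total
--     for i in range(len(arr)):
--         total -= arr[i]
--         ans += total
--     return ans
-- ===== SOURCE B (Python) =====
-- def ex1ElementsRemoval(arr):
--     arr.sort(reverse=True)
--     return sum((i + 1) * v for i, v in enumerate(arr))
-- ===== Notes on version B (the rewrite author's own statement) =====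
-- stated objective: simpler
-- what changed: Replaces the two accumulation loops (sum, then repeated subtraction with re-accumulation) by a single closed-form rank-weighted sum over the sorted list.
import Mathlib
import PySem

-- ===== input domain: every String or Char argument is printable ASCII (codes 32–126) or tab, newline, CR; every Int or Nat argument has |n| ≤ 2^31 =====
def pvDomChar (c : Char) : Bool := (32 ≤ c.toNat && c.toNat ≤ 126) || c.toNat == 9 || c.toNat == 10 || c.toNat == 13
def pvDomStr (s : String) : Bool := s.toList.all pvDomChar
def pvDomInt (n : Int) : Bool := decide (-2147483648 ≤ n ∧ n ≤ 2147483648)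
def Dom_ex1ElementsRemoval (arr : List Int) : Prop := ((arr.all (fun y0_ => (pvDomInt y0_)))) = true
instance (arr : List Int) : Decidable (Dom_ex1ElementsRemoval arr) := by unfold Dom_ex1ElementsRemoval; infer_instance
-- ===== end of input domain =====

-- B replaces A's two accumulation loops by one rank-weighted sum over the sorted list (simpler).
-- Both programs sort the caller's list in place; the equivalence proved here is about the return value
-- (B performs the same in-place sort, so the mutation is identical too).

-- ===== PORT A =====
def ex1ElementsRemoval (arr : List Int) : Int :=
  let s := PySem.List.sorted arr (fun x => x) true
  let total := (PySem.List.pyRange 0 (PySem.List.len s) 1).foldl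
      (fun acc i => acc + PySem.List.pyGetD s i 0) 0
  let st := (PySem.List.pyRange 0 (PySem.List.len s) 1).foldl
      (fun (p : Int × Int) i =>
        (p.1 - PySem.List.pyGetD s i 0, p.2 + (p.1 - PySem.List.pyGetD s i 0)))
      (total, total)
  st.2

-- ===== PORT B =====
def ex1ElementsRemoval_alt (arr : List Int) : Int :=
  let s := PySem.List.sorted arr (fun x => x) true
  (PySem.List.enumerate s 0).foldl (fun acc p => acc + (p.1 + 1) * p.2) 0

-- ===== PRECONDITION & SPEC =====
def Spec_ex1ElementsRemoval (arr : List Int) (out : Int) : Prop := out = ex1ElementsRemoval_alt arr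
instance (arr : List Int) (out : Int) : Decidable (Spec_ex1ElementsRemoval arr out) := by unfold Spec_ex1ElementsRemoval; infer_instance

-- ===== CLAIM (what is proved, stated in full; the proofs are below) =====
def Claim_equal_ex1ElementsRemoval : Prop := ∀ (arr : List Int), Dom_ex1ElementsRemoval arr → Spec_ex1ElementsRemoval arr (ex1ElementsRemoval arr)

-- ===== LEMMAS AND PROOFS =====

/-- Weighted sum with coefficients starting at `k`: `wsum [x0,…] k = k*x0 + (k+1)*x1 + …` -/
def wsum : List Int → Int → Int
  | [], _ => 0
  | x :: xs, k => k * x + wsum xs (k + 1)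

theorem wsum_succ (l : List Int) : ∀ k : Int, wsum l (k + 1) = wsum l k + l.sum := by
  induction l with
  | nil => intro k; simp [wsum]
  | cons x xs ih => intro k; simp [wsum, ih (k + 1)]; ring

/-- A's second loop: running subtraction with re-accumulation, in closed form. -/
theorem loopA (l : List Int) : ∀ t a : Int,
    (l.foldl (fun (p : Int × Int) x => (p.1 - x, p.2 + (p.1 - x))) (t, a)).2
      = a + l.length * t - l.length * l.sum + wsum l 0 := by
  induction l with
  | nil => intro t a; simp [wsum]
  | cons x xs ih =>
    intro t a
    simp only [List.foldl_cons, List.sum_cons, List.length_cons, wsum]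
    rw [ih (t - x) (a + (t - x)), wsum_succ]
    push_cast
    ring

/-- B's loop over `enumerate` computes a weighted sum with offset coefficients. -/
theorem loopB (l : List Int) : ∀ (k acc : Int),
    (PySem.List.enumerate l k).foldl (fun acc p => acc + (p.1 + 1) * p.2) acc
      = acc + wsum l (k + 1) := by
  induction l with
  | nil => intro k acc; simp [PySem.List.enumerate_nil, wsum]
  | cons x xs ih =>
    intro k acc
    rw [PySem.List.enumerate_cons]
    simp only [List.foldl_cons, wsum]
    rw [ih (k + 1)]
    ring

-- ===== VERDICT (by name: the statement is the Claim_ definition above) =====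
theorem ex1ElementsRemoval_spec : Claim_equal_ex1ElementsRemoval := by
  intro arr _
  unfold Spec_ex1ElementsRemoval ex1ElementsRemoval ex1ElementsRemoval_alt
  set s := PySem.List.sorted arr (fun x => x) true with hs
  simp only
  rw [PySem.List.foldl_pyRange_zero_pyGetD s 0 (fun acc x => acc + x) 0,
      PySem.List.foldl_pyRange_zero_pyGetD s 0
        (fun (p : Int × Int) x => (p.1 - x, p.2 + (p.1 - x)))]
  rw [← List.sum_eq_foldl]
  rw [loopA, loopB]
  rw [show (0 : Int) + 1 = 1 from rfl, show wsum s 1 = wsum s (0 + 1) from by norm_num,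
      wsum_succ]
  simp
  ring
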